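-- pv_equiv track=rewrite | github.com/chlwndms/codematecotelv1 | 1-search/quiz1-1.py | count
-- ===== SOURCE A (Python) =====
-- def count(m, li):
--     cnt = 0
--     for i in range(len(li)):
--         temp = li[i]
--         while m<temp:
--             temp-=m
--             cnt +=1
--     return cnt
-- ===== SOURCE B (Python) =====
-- def count(m, li):
--     if m <= 0:
--         return 0
--     return sum(max(0, (x - 1) // m) for x in li)
-- ===== Notes on version B (the rewrite author's own statement) =====
-- stated objective: alternative
-- what changed: replaces the per-element repeated-subtraction while-loop by the closed form max(0,(x-1)//m) summed in one pass
import Mathlib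
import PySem

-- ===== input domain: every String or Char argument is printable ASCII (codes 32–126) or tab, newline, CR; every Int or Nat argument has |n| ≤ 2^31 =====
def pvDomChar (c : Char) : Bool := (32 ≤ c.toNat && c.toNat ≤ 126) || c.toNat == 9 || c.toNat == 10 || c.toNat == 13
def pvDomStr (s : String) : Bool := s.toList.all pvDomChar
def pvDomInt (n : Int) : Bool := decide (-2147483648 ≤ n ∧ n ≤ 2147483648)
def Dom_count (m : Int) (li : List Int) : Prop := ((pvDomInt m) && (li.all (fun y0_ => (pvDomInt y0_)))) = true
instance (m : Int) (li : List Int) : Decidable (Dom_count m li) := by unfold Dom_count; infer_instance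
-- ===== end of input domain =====

-- B replaces A's per-element repeated subtraction by the closed form max(0,(x-1)//m) summed in one pass.

-- ===== PORT A =====
-- A's inner 'while m < temp' loop, transcribed with a fuel counter; fuel temp.toNat is
-- enough for every terminating run (m > 0 needs at most temp-1 iterations), and inputs on
-- which the Python loop diverges (m ≤ 0 with some element > m) are excluded by Pre_count.
def countLoopA (m : Int) : Nat → Int → Int → Int
  | 0, _, cnt => cnt
  | f + 1, temp, cnt => if m < temp then countLoopA m f (temp - m) (cnt + 1) else cnt

def count (m : Int) (li : List Int) : Int :=
  li.foldl (fun cnt x => countLoopA m x.toNat x cnt) 0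

-- ===== PORT B =====
def count_alt (m : Int) (li : List Int) : Int :=
  if m ≤ 0 then 0
  else li.foldl (fun acc x => acc + max 0 (PySem.Int.floordiv (x - 1) m)) 0

-- ===== PRECONDITION & SPEC =====
-- Pre_ excludes exactly the inputs where A's while-loop never terminates: m ≤ 0 together
-- with some element greater than m (there temp-m only grows, so Python A diverges).
def Pre_count (m : Int) (li : List Int) : Prop := 0 < m ∨ ∀ x ∈ li, x ≤ m
instance (m : Int) (li : List Int) : Decidable (Pre_count m li) := by unfold Pre_count; infer_instance

def pvWitness_count : Int × List Int := (3, [10, -4, 3, 17])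

def Spec_count (m : Int) (li : List Int) (out : Int) : Prop := out = count_alt m li
instance (m : Int) (li : List Int) (out : Int) : Decidable (Spec_count m li out) := by unfold Spec_count; infer_instance

-- ===== CLAIM (what is proved, stated in full; the proofs are below) =====
def Claim_equal_count : Prop := ∀ (m : Int) (li : List Int), Dom_count m li → Pre_count m li → Spec_count m li (count m li)

-- ===== LEMMAS AND PROOFS =====

-- Closed form of A's inner loop when m > 0 and the fuel is sufficient.
theorem countLoopA_closed (m : Int) (hm : 0 < m) :
    ∀ (fuel : Nat) (temp cnt : Int),
      max 0 (PySem.Int.floordiv (temp - 1) m) ≤ (fuel : Int) →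
      countLoopA m fuel temp cnt = cnt + max 0 (PySem.Int.floordiv (temp - 1) m) := by
  intro fuel
  induction fuel with
  | zero =>
    intro temp cnt h
    rw [PySem.Int.floordiv_eq_ediv_of_pos hm] at h ⊢
    have hq : (temp - 1) / m ≤ 0 := by omega
    simp [countLoopA]
    omega
  | succ f ih =>
    intro temp cnt h
    rw [PySem.Int.floordiv_eq_ediv_of_pos hm] at h ⊢
    by_cases hlt : m < temp
    · have h1 : 1 ≤ (temp - 1) / m := by
        rw [Int.le_ediv_iff_mul_le hm]; omega
      have hsub : (temp - m - 1) / m = (temp - 1) / m - 1 := by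
        have := Int.add_mul_ediv_right (temp - 1) (-1) (Int.ne_of_gt hm)
        have he : temp - m - 1 = temp - 1 + -1 * m := by ring
        rw [he, this]; ring
      simp only [countLoopA, if_pos hlt]
      rw [ih (temp - m) (cnt + 1)
        (by rw [PySem.Int.floordiv_eq_ediv_of_pos hm, hsub]; omega)]
      rw [PySem.Int.floordiv_eq_ediv_of_pos hm, hsub]
      omega
    · have hq : (temp - 1) / m ≤ 0 := by
        have : (temp - 1) / m < 1 := by rw [Int.ediv_lt_iff_lt_mul hm]; omega
        omega
      simp only [countLoopA, if_neg hlt]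
      omega

-- The closed form fits inside fuel x.toNat.
theorem fuel_enough (m x : Int) (hm : 0 < m) :
    max 0 (PySem.Int.floordiv (x - 1) m) ≤ ((x.toNat : Nat) : Int) := by
  rw [PySem.Int.floordiv_eq_ediv_of_pos hm]
  by_cases hx : 0 < x
  · have h1 : (x - 1) / m ≤ x - 1 := Int.ediv_le_self _ (by omega)
    omega
  · have : (x - 1) / m < 1 := by rw [Int.ediv_lt_iff_lt_mul hm]; omega
    omega

theorem fold_eq (m : Int) (hm : 0 < m) (li : List Int) :
    ∀ (acc : Int),
      li.foldl (fun cnt x => countLoopA m x.toNat x cnt) acc =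
      li.foldl (fun acc x => acc + max 0 (PySem.Int.floordiv (x - 1) m)) acc := by
  induction li with
  | nil => intro acc; rfl
  | cons x xs ih =>
    intro acc
    simp only [List.foldl_cons]
    rw [countLoopA_closed m hm _ x acc (fuel_enough m x hm), ih]

theorem fold_zero (m : Int) (li : List Int) (hall : ∀ x ∈ li, x ≤ m) :
    ∀ (acc : Int), li.foldl (fun cnt x => countLoopA m x.toNat x cnt) acc = acc := by
  induction li with
  | nil => intro acc; rfl
  | cons x xs ih =>
    intro acc
    have hx : x ≤ m := hall x (List.mem_cons_self)
    have hstep : countLoopA m x.toNat x acc = acc := by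
      cases h : x.toNat with
      | zero => rfl
      | succ f => simp [countLoopA, not_lt.mpr hx]
    simp only [List.foldl_cons, hstep]
    exact ih (fun y hy => hall y (List.mem_cons_of_mem _ hy)) acc

-- ===== VERDICT (by name: the statement is the Claim_ definition above) =====
theorem count_spec : Claim_equal_count := by
  intro m li _ hpre
  unfold Spec_count count count_alt
  by_cases hm : 0 < m
  · rw [if_neg (by omega), fold_eq m hm li 0]
  · have hall : ∀ x ∈ li, x ≤ m := by
      rcases hpre with h | h
      · exact absurd h hm
      · exact h
    rw [if_pos (by omega), fold_zero m li hall 0]
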